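-- pv_equiv track=rewrite | github.com/Chenjy0212/mdelta | mdelta/auxi.py | loopindex
-- ===== SOURCE A (Python) =====
-- def loopindex(row, col):
--     ll = []
--     min_ = min(row, col)
--     for i in range(min_):
--         for j in range(i):
--             ll.append([j, i])
--             ll.append([i, j])
--         ll.append([i, i])
--     if row > col:
--         for j in range(col+1, row+1):
--             for i in range(col):
--                 ll.append([j-1, i])
--     elif col > row:
--         for j in range(row+1, col+1):
--             for i in range(row):
--                 ll.append([i, j-1])
--     return ll
-- ===== SOURCE B (Python) =====
-- def loopindex(row, col):
--     # build every [a, b] pair, then sort by the pair's rank in diagonal order: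
--     # rank = (number of pairs in all diagonal shells below max(a,b)) + position inside the shell,
--     # i.e. 4*m*m + 2*min(a,b) + (a > b) with m = max(a, b).
--     ll = [[a, b] for a in range(row) for b in range(col)]
--     ll.sort(key=lambda p: 4*p[0]*p[0] + 2*p[1] + 1 if p[0] > p[1] else 4*p[1]*p[1] + 2*p[0])
--     return ll
-- ===== Notes on version B (the rewrite author's own statement) =====
-- stated objective: alternative
-- what changed: A emits the pairs directly in diagonal order (square-shell double loop plus a rectangular tail); B generates all row*col pairs with a comprehension and sorts them by an integer rank key 4*m*m + 2*min(p) + (p[0]>p[1]) (m = max(p)) that imposes the same diagonal order.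
import Mathlib
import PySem

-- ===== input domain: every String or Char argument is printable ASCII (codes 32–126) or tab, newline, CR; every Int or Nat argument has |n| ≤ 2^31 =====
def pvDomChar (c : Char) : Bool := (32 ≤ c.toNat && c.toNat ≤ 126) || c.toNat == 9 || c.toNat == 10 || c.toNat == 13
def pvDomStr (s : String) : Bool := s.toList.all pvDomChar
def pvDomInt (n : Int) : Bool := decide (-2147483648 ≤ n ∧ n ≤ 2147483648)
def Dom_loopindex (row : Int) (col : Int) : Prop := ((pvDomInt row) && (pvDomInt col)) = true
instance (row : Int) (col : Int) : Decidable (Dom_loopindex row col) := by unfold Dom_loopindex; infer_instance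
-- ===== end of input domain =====

-- B replaces A's direct ordered emission (square-shell double loop plus rectangular tail) by
-- generate-all-pairs-then-sort with a diagonal sort key; objective: alternative algorithm, same result.

-- ===== PORT A =====
def loopindex (row : Int) (col : Int) : List (List Int) :=
  let ll : List (List Int) := []
  let min_ : Int := min row col
  let ll := (PySem.List.pyRange 0 min_).foldl (fun ll i =>
      ((PySem.List.pyRange 0 i).foldl (fun ll j => (ll ++ [[j, i]]) ++ [[i, j]]) ll) ++ [[i, i]]) ll
  if row > col then
    (PySem.List.pyRange (col+1) (row+1)).foldl (fun ll j =>
      (PySem.List.pyRange 0 col).foldl (fun ll i => ll ++ [[j-1, i]]) ll) ll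
  else if col > row then
    (PySem.List.pyRange (row+1) (col+1)).foldl (fun ll j =>
      (PySem.List.pyRange 0 row).foldl (fun ll i => ll ++ [[i, j-1]]) ll) ll
  else ll

-- ===== PORT B =====
-- Python sort key `4*p[0]*p[0] + 2*p[1] + 1 if p[0] > p[1] else 4*p[1]*p[1] + 2*p[0]`;
-- `p[0]`/`p[1]` via pyGetD is exact here because every element of the sorted list is a
-- 2-element list (the index is always in range).
def pvKeyB (p : List Int) : Int :=
  if PySem.List.pyGetD p 1 0 < PySem.List.pyGetD p 0 0 then
    4 * PySem.List.pyGetD p 0 0 * PySem.List.pyGetD p 0 0 + 2 * PySem.List.pyGetD p 1 0 + 1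
  else
    4 * PySem.List.pyGetD p 1 0 * PySem.List.pyGetD p 1 0 + 2 * PySem.List.pyGetD p 0 0

def loopindex_alt (row : Int) (col : Int) : List (List Int) :=
  let ll := (PySem.List.pyRange 0 row).flatMap (fun a => (PySem.List.pyRange 0 col).map (fun b => [a, b]))
  PySem.List.sorted ll pvKeyB

-- ===== PRECONDITION & SPEC =====
def Spec_loopindex (row : Int) (col : Int) (out : List (List Int)) : Prop := out = loopindex_alt row col
instance (row : Int) (col : Int) (out : List (List Int)) : Decidable (Spec_loopindex row col out) := by unfold Spec_loopindex; infer_instance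

-- ===== CLAIM (what is proved, stated in full; the proofs are below) =====
def Claim_equal_loopindex : Prop := ∀ (row : Int) (col : Int), Dom_loopindex row col → Spec_loopindex row col (loopindex row col)

-- ===== LEMMAS AND PROOFS =====

lemma pvFlatMap_single {α β : Type} (g : α → β) (l : List α) :
    l.flatMap (fun x => [g x]) = l.map g := by induction l <;> simp_all

def pvShell (i : Nat) : List (List Int) :=
  (List.range i).flatMap (fun (j : Nat) => [[(j : Int), (i : Int)], [(i : Int), (j : Int)]]) ++ [[(i : Int), (i : Int)]]
def pvRowBlk (r : Int) (C : Nat) : List (List Int) := (List.range C).map (fun (b : Nat) => [r, (b : Int)])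
def pvColBlk (c : Int) (R : Nat) : List (List Int) := (List.range R).map (fun (a : Nat) => [(a : Int), c])

def pvTail (row col : Int) : List (List Int) :=
  if row > col then (List.range (row - col).toNat).flatMap (fun (k : Nat) => pvRowBlk (col + (k : Int)) col.toNat)
  else if col > row then (List.range (col - row).toNat).flatMap (fun (k : Nat) => pvColBlk (row + (k : Int)) row.toNat)
  else []

lemma pvShells_eq (m : Int) (ll0 : List (List Int)) :
    (PySem.List.pyRange 0 m).foldl (fun ll i =>
      ((PySem.List.pyRange 0 i).foldl (fun ll j => (ll ++ [[j, i]]) ++ [[i, j]]) ll) ++ [[i, i]]) ll0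
    = ll0 ++ (List.range m.toNat).flatMap pvShell := by
  have hinner : ∀ (i : Int) (ll : List (List Int)),
      (PySem.List.pyRange 0 i).foldl (fun ll j => (ll ++ [[j, i]]) ++ [[i, j]]) ll
        = ll ++ (List.range i.toNat).flatMap (fun (j : Nat) => [[(j : Int), i], [i, (j : Int)]]) := by
    intro i ll
    rw [show (fun (ll : List (List Int)) j => (ll ++ [[j, i]]) ++ [[i, j]])
        = fun ll j => ll ++ [[j, i], [i, j]] from by funext ll j; simp]
    rw [PySem.List.foldl_append_eq_flatMap (fun j => [[j, i], [i, j]]),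
        PySem.List.pyRange_one, List.flatMap_map]
    simp
  rw [show (fun (ll : List (List Int)) i =>
        ((PySem.List.pyRange 0 i).foldl (fun ll j => (ll ++ [[j, i]]) ++ [[i, j]]) ll) ++ [[i, i]])
      = fun ll i => ll ++ ((List.range i.toNat).flatMap (fun (j : Nat) => [[(j : Int), i], [i, (j : Int)]]) ++ [[i, i]]) from by
        funext ll i; rw [hinner]; simp]
  rw [PySem.List.foldl_append_eq_flatMap
      (fun i => (List.range i.toNat).flatMap (fun (j : Nat) => [[(j : Int), i], [i, (j : Int)]]) ++ [[i, i]]),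
      PySem.List.pyRange_one, List.flatMap_map]
  rw [show m - 0 = m from by ring]
  congr 1
  apply List.flatMap_congr
  intro k _
  simp [pvShell]

lemma pvLoopindex_eq (row col : Int) :
    loopindex row col = (List.range (min row col).toNat).flatMap pvShell ++ pvTail row col := by
  unfold loopindex pvTail
  dsimp only
  rw [pvShells_eq]
  by_cases h1 : row > col
  · simp only [if_pos h1, List.nil_append]
    have hinner : ∀ (j : Int) (ll : List (List Int)),
        (PySem.List.pyRange 0 col).foldl (fun ll i => ll ++ [[j-1, i]]) ll
          = ll ++ pvRowBlk (j-1) col.toNat := by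
      intro j ll
      rw [PySem.List.foldl_append_eq_flatMap (fun i => [[j-1, i]]),
          PySem.List.pyRange_one, List.flatMap_map]
      rw [show (fun (a : Nat) => (fun (i : Int) => [[j-1, i]]) ((0 : Int) + (a : Int)))
           = fun (a : Nat) => [[j - 1, (a : Int)]] from by funext a; simp]
      rw [pvFlatMap_single (fun (b : Nat) => [j - 1, (b : Int)])]
      simp [pvRowBlk]
    rw [show (fun (ll : List (List Int)) j =>
          (PySem.List.pyRange 0 col).foldl (fun ll i => ll ++ [[j-1, i]]) ll)
        = fun ll j => ll ++ pvRowBlk (j-1) col.toNat from funext fun ll => funext fun j => hinner j ll]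
    rw [PySem.List.foldl_append_eq_flatMap (fun j => pvRowBlk (j-1) col.toNat),
        PySem.List.pyRange_one, List.flatMap_map]
    have h2 : row + 1 - (col + 1) = row - col := by ring
    rw [h2]
    congr 1
    apply List.flatMap_congr
    intro k _
    show pvRowBlk (col + 1 + (k : Int) - 1) col.toNat = _
    congr 1
    ring
  · by_cases h2 : col > row
    · simp only [if_neg h1, if_pos h2, List.nil_append]
      have hinner : ∀ (j : Int) (ll : List (List Int)),
          (PySem.List.pyRange 0 row).foldl (fun ll i => ll ++ [[i, j-1]]) ll
            = ll ++ pvColBlk (j-1) row.toNat := by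
        intro j ll
        rw [PySem.List.foldl_append_eq_flatMap (fun i => [[i, j-1]]),
            PySem.List.pyRange_one, List.flatMap_map]
        rw [show (fun (a : Nat) => (fun (i : Int) => [[i, j-1]]) ((0 : Int) + (a : Int)))
             = fun (a : Nat) => [[(a : Int), j - 1]] from by funext a; simp]
        rw [pvFlatMap_single (fun (a : Nat) => [(a : Int), j - 1])]
        simp [pvColBlk]
      rw [show (fun (ll : List (List Int)) j =>
            (PySem.List.pyRange 0 row).foldl (fun ll i => ll ++ [[i, j-1]]) ll)
          = fun ll j => ll ++ pvColBlk (j-1) row.toNat from funext fun ll => funext fun j => hinner j ll]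
      rw [PySem.List.foldl_append_eq_flatMap (fun j => pvColBlk (j-1) row.toNat),
          PySem.List.pyRange_one, List.flatMap_map]
      have h3 : col + 1 - (row + 1) = col - row := by ring
      rw [h3]
      congr 1
      apply List.flatMap_congr
      intro k _
      show pvColBlk (row + 1 + (k : Int) - 1) row.toNat = _
      congr 1
      ring
    · simp [if_neg h1, if_neg h2]

-- pvEnc x y is the sort key of a pair with larger coordinate x and in-shell position y
def pvEnc (x y : Int) : Int := 4 * x * x + y

lemma pvKeyB_pair (a b : Int) :
    pvKeyB [a, b] = if b < a then pvEnc a (2 * b + 1) else pvEnc b (2 * a) := by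
  simp only [pvKeyB, pvEnc, PySem.List.pyGetD]
  norm_num [PySem.List.pyIdx?]
  split_ifs <;> ring

lemma pvEnc_lt_snd (x : Int) {y y' : Int} (h : y < y') : pvEnc x y < pvEnc x y' := by
  unfold pvEnc; omega

lemma pvEnc_lt_fst {x y x' y' : Int} (hy0 : 0 ≤ y) (hyb : y ≤ 2 * x) (hy'0 : 0 ≤ y')
    (hx : x < x') : pvEnc x y < pvEnc x' y' := by
  unfold pvEnc
  nlinarith [sq_nonneg (x' - x - 1), sq_nonneg x, sq_nonneg x']

lemma pvRange_two_mul (i : Nat) :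
    List.range (2 * i) = (List.range i).flatMap (fun j => [2 * j, 2 * j + 1]) := by
  induction i with
  | zero => simp
  | succ n ih =>
      have h : 2 * (n + 1) = (2 * n + 1) + 1 := by ring
      rw [h, List.range_succ, List.range_succ, ih, List.range_succ]
      simp

lemma pvMap_key_shell (i : Nat) :
    (pvShell i).map pvKeyB = (List.range (2 * i + 1)).map (fun (t : Nat) => pvEnc (i : Int) (t : Int)) := by
  rw [pvShell, List.map_append, List.map_flatMap]
  rw [List.range_succ, List.map_append, pvRange_two_mul, List.map_flatMap]
  congr 1
  · apply List.flatMap_congr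
    intro j hj
    rw [List.mem_range] at hj
    have hji : (j : Int) < (i : Int) := by exact_mod_cast hj
    simp only [List.map_cons, List.map_nil, pvKeyB_pair]
    rw [if_neg (by omega), if_pos hji]
    simp only [pvEnc]
    push_cast
    norm_num
  · simp only [List.map_cons, List.map_nil, pvKeyB_pair, if_neg (lt_irrefl (i : Int)), pvEnc]
    push_cast
    norm_num

lemma pvMap_key_rowBlk (r : Int) (C : Nat) (h : ∀ b : Nat, b < C → (b : Int) < r) :
    (pvRowBlk r C).map pvKeyB = (List.range C).map (fun (b : Nat) => pvEnc r (2 * (b : Int) + 1)) := by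
  rw [pvRowBlk, List.map_map]
  apply List.map_congr_left
  intro b hb
  rw [List.mem_range] at hb
  have hbr : (b : Int) < r := h b hb
  simp only [Function.comp_apply, pvKeyB_pair]
  rw [if_pos hbr]

lemma pvMap_key_colBlk (c : Int) (R : Nat) (h : ∀ a : Nat, a < R → (a : Int) < c) :
    (pvColBlk c R).map pvKeyB = (List.range R).map (fun (a : Nat) => pvEnc c (2 * (a : Int))) := by
  rw [pvColBlk, List.map_map]
  apply List.map_congr_left
  intro a ha
  rw [List.mem_range] at ha
  have hac : (a : Int) < c := h a ha
  simp only [Function.comp_apply, pvKeyB_pair]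
  rw [if_neg (by omega)]

-- key first-component extraction
lemma pvKey_mem_shell {p : List Int} {i : Nat} (hp : p ∈ pvShell i) :
    ∃ t : Nat, t < 2 * i + 1 ∧ pvKeyB p = pvEnc (i : Int) (t : Int) := by
  have : pvKeyB p ∈ (pvShell i).map pvKeyB := List.mem_map_of_mem hp
  rw [pvMap_key_shell] at this
  rcases List.mem_map.mp this with ⟨t, htm, ht⟩
  exact ⟨t, List.mem_range.mp htm, ht.symm⟩

lemma pvKey_mem_rowBlk {p : List Int} {r : Int} {C : Nat} (h : ∀ b : Nat, b < C → (b : Int) < r) (hp : p ∈ pvRowBlk r C) :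
    ∃ t : Int, 0 ≤ t ∧ t ≤ 2 * r ∧ pvKeyB p = pvEnc r t := by
  have : pvKeyB p ∈ (pvRowBlk r C).map pvKeyB := List.mem_map_of_mem hp
  rw [pvMap_key_rowBlk r C h] at this
  rcases List.mem_map.mp this with ⟨t, htm, ht⟩
  have htr : (t : Int) < r := h t (List.mem_range.mp htm)
  exact ⟨2 * (t : Int) + 1, by positivity, by omega, ht.symm⟩

lemma pvKey_mem_colBlk {p : List Int} {c : Int} {R : Nat} (h : ∀ a : Nat, a < R → (a : Int) < c) (hp : p ∈ pvColBlk c R) :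
    ∃ t : Int, 0 ≤ t ∧ t ≤ 2 * c ∧ pvKeyB p = pvEnc c t := by
  have : pvKeyB p ∈ (pvColBlk c R).map pvKeyB := List.mem_map_of_mem hp
  rw [pvMap_key_colBlk c R h] at this
  rcases List.mem_map.mp this with ⟨t, htm, ht⟩
  have htc : (t : Int) < c := h t (List.mem_range.mp htm)
  exact ⟨2 * (t : Int), by positivity, by omega, ht.symm⟩

-- pairwise within one shell / block
lemma pvPairwise_of_map {n : Nat} {l : List (List Int)} {g : Nat → Int}
    (hmap : l.map pvKeyB = (List.range n).map g)
    (hmono : ∀ a b : Nat, a < b → b < n → g a < g b) :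
    l.Pairwise (fun p q => pvKeyB p < pvKeyB q) := by
  rw [← List.pairwise_map (f := pvKeyB) (R := (· < ·)), hmap, List.pairwise_map]
  apply List.pairwise_iff_getElem.mpr
  intro a b ha hb hab
  simp only [List.getElem_range]
  exact hmono a b hab (by simpa using hb)

lemma pvPairwise_shell (i : Nat) : (pvShell i).Pairwise (fun p q => pvKeyB p < pvKeyB q) := by
  refine pvPairwise_of_map (pvMap_key_shell i) ?_
  intro a b hab _
  exact pvEnc_lt_snd _ (by exact_mod_cast hab)

lemma pvPairwise_blocks (N : Nat) (f : Nat → List (List Int)) (c : Nat → Int)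
    (hblock : ∀ k, k < N → (f k).Pairwise (fun p q => pvKeyB p < pvKeyB q))
    (hkey : ∀ k, k < N → ∀ p ∈ f k, ∃ t : Int, 0 ≤ t ∧ t ≤ 2 * c k ∧ pvKeyB p = pvEnc (c k) t)
    (hmono : ∀ a b : Nat, a < b → b < N → c a < c b) :
    ((List.range N).flatMap f).Pairwise (fun p q => pvKeyB p < pvKeyB q) := by
  induction N with
  | zero => simp
  | succ n ih =>
      rw [List.range_succ, List.flatMap_append]
      rw [List.pairwise_append]
      refine ⟨ih (fun k hk => hblock k (by omega)) (fun k hk => hkey k (by omega))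
        (fun a b hab hb => hmono a b hab (by omega)), by simpa using hblock n (by omega), ?_⟩
      intro p hp q hq
      rcases List.mem_flatMap.mp hp with ⟨i, hi, hpi⟩
      rw [List.mem_range] at hi
      rcases hkey i (by omega) p hpi with ⟨t, ht0, htb, hpt⟩
      rcases hkey n (by omega) q (by simpa using hq) with ⟨s, hs0, _, hqs⟩
      rw [hpt, hqs]
      exact pvEnc_lt_fst ht0 htb hs0 (hmono i n hi (by omega))

lemma pvPairwise_shells (M : Nat) :
    ((List.range M).flatMap pvShell).Pairwise (fun p q => pvKeyB p < pvKeyB q) := by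
  refine pvPairwise_blocks M pvShell (fun i => (i : Int))
    (fun k _ => pvPairwise_shell k) ?_ ?_
  · intro k _ p hp
    rcases pvKey_mem_shell hp with ⟨t, htb, ht⟩
    exact ⟨(t : Int), by positivity, by push_cast; omega, ht⟩
  · intro a b hab _
    show (a : Int) < (b : Int)
    exact_mod_cast hab

lemma pvPairwise_rowBlk (r : Int) (C : Nat) (h : ∀ b : Nat, b < C → (b : Int) < r) :
    (pvRowBlk r C).Pairwise (fun p q => pvKeyB p < pvKeyB q) := by
  refine pvPairwise_of_map (pvMap_key_rowBlk r C h) ?_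
  intro a b hab _
  refine pvEnc_lt_snd _ ?_
  have : (a : Int) < (b : Int) := by exact_mod_cast hab
  omega

lemma pvPairwise_colBlk (c : Int) (R : Nat) (h : ∀ a : Nat, a < R → (a : Int) < c) :
    (pvColBlk c R).Pairwise (fun p q => pvKeyB p < pvKeyB q) := by
  refine pvPairwise_of_map (pvMap_key_colBlk c R h) ?_
  intro a b hab _
  refine pvEnc_lt_snd _ ?_
  have : (a : Int) < (b : Int) := by exact_mod_cast hab
  omega

lemma pvPairwise_tail (row col : Int) :
    (pvTail row col).Pairwise (fun p q => pvKeyB p < pvKeyB q) := by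
  unfold pvTail
  split_ifs with h1 h2
  · refine pvPairwise_blocks _ _ (fun k => col + (k : Int))
      (fun k _ => pvPairwise_rowBlk _ _ (fun b hb => show (b : Int) < col + (k : Int) by omega)) ?_ ?_
    · intro k _ p hp
      exact pvKey_mem_rowBlk (fun b hb => show (b : Int) < col + (k : Int) by omega) hp
    · intro a b hab _
      show col + (a : Int) < col + (b : Int)
      have : (a : Int) < (b : Int) := by exact_mod_cast hab
      omega
  · refine pvPairwise_blocks _ _ (fun k => row + (k : Int))
      (fun k _ => pvPairwise_colBlk _ _ (fun a ha => show (a : Int) < row + (k : Int) by omega)) ?_ ?_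
    · intro k _ p hp
      exact pvKey_mem_colBlk (fun a ha => show (a : Int) < row + (k : Int) by omega) hp
    · intro a b hab _
      show row + (a : Int) < row + (b : Int)
      have : (a : Int) < (b : Int) := by exact_mod_cast hab
      omega
  · simp

lemma pvPairwise_full (row col : Int) :
    ((List.range (min row col).toNat).flatMap pvShell ++ pvTail row col).Pairwise
      (fun p q => pvKeyB p < pvKeyB q) := by
  rw [List.pairwise_append]
  refine ⟨pvPairwise_shells _, pvPairwise_tail _ _, ?_⟩
  intro p hp q hq
  rcases List.mem_flatMap.mp hp with ⟨i, hi, hpi⟩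
  rw [List.mem_range] at hi
  rcases pvKey_mem_shell hpi with ⟨t, htb, hpt⟩
  unfold pvTail at hq
  split_ifs at hq with h1 h2
  · rcases List.mem_flatMap.mp hq with ⟨k, hk, hqk⟩
    rw [List.mem_range] at hk
    rcases pvKey_mem_rowBlk (fun b hb => show (b : Int) < col + (k : Int) by omega) hqk
      with ⟨s, hs0, _, hqs⟩
    rw [hpt, hqs]
    have hm : min row col = col := min_eq_right (le_of_lt h1)
    rw [hm] at hi
    exact pvEnc_lt_fst (by positivity) (by omega) hs0 (by omega)
  · rcases List.mem_flatMap.mp hq with ⟨k, hk, hqk⟩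
    rw [List.mem_range] at hk
    rcases pvKey_mem_colBlk (fun a ha => show (a : Int) < row + (k : Int) by omega) hqk
      with ⟨s, hs0, _, hqs⟩
    rw [hpt, hqs]
    have hm : min row col = row := min_eq_left (le_of_lt h2)
    rw [hm] at hi
    exact pvEnc_lt_fst (by positivity) (by omega) hs0 (by omega)
  · simp at hq

lemma pvMem_shells (M : Nat) (p : List Int) :
    p ∈ (List.range M).flatMap pvShell ↔
      ∃ a b : Int, 0 ≤ a ∧ 0 ≤ b ∧ max a b < (M : Int) ∧ p = [a, b] := by
  constructor
  · intro hp
    rcases List.mem_flatMap.mp hp with ⟨i, hi, hpi⟩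
    rw [List.mem_range] at hi
    rw [pvShell] at hpi
    rcases List.mem_append.mp hpi with h | h
    · rcases List.mem_flatMap.mp h with ⟨j, hj, hpj⟩
      rw [List.mem_range] at hj
      simp only [List.mem_cons, List.not_mem_nil, or_false] at hpj
      rcases hpj with rfl | rfl
      · exact ⟨(j : Int), (i : Int), by positivity, by positivity, by omega, rfl⟩
      · exact ⟨(i : Int), (j : Int), by positivity, by positivity, by omega, rfl⟩
    · simp only [List.mem_cons, List.not_mem_nil, or_false] at h
      subst h
      exact ⟨(i : Int), (i : Int), by positivity, by positivity, by omega, rfl⟩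
  · rintro ⟨a, b, ha, hb, hmax, rfl⟩
    apply List.mem_flatMap.mpr
    refine ⟨(max a b).toNat, List.mem_range.mpr (by omega), ?_⟩
    rw [pvShell]
    apply List.mem_append.mpr
    rcases lt_trichotomy a b with h | h | h
    · left
      apply List.mem_flatMap.mpr
      refine ⟨a.toNat, List.mem_range.mpr (by omega), ?_⟩
      simp only [List.mem_cons, List.not_mem_nil, or_false]
      left
      have h1 : ((a.toNat : Nat) : Int) = a := by omega
      have h2 : (((max a b).toNat : Nat) : Int) = b := by omega
      rw [h1, h2]
    · right
      simp only [List.mem_cons, List.not_mem_nil, or_false]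
      have h2 : (((max a b).toNat : Nat) : Int) = a := by omega
      have h3 : (((max a b).toNat : Nat) : Int) = b := by omega
      rw [h2, h]
    · left
      apply List.mem_flatMap.mpr
      refine ⟨b.toNat, List.mem_range.mpr (by omega), ?_⟩
      simp only [List.mem_cons, List.not_mem_nil, or_false]
      right
      have h1 : ((b.toNat : Nat) : Int) = b := by omega
      have h2 : (((max a b).toNat : Nat) : Int) = a := by omega
      rw [h1, h2]

lemma pvMem_tail (row col : Int) (p : List Int) :
    p ∈ pvTail row col ↔
      (row > col ∧ ∃ a b : Int, col ≤ a ∧ a < row ∧ 0 ≤ b ∧ b < col ∧ p = [a, b]) ∨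
      (col > row ∧ ∃ a b : Int, 0 ≤ a ∧ a < row ∧ row ≤ b ∧ b < col ∧ p = [a, b]) := by
  unfold pvTail
  split_ifs with h1 h2
  · constructor
    · intro hp
      rcases List.mem_flatMap.mp hp with ⟨k, hk, hpk⟩
      rw [List.mem_range] at hk
      rcases List.mem_map.mp hpk with ⟨b, hb, rfl⟩
      rw [List.mem_range] at hb
      exact Or.inl ⟨h1, col + (k : Int), (b : Int), by omega, by omega, by positivity, by omega, rfl⟩
    · rintro (⟨_, a, b, h3, h4, h5, h6, rfl⟩ | ⟨h2, _⟩)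
      · apply List.mem_flatMap.mpr
        refine ⟨(a - col).toNat, List.mem_range.mpr (by omega), ?_⟩
        apply List.mem_map.mpr
        refine ⟨b.toNat, List.mem_range.mpr (by omega), ?_⟩
        have e1 : col + (((a - col).toNat : Nat) : Int) = a := by omega
        have e2 : ((b.toNat : Nat) : Int) = b := by omega
        rw [e1, e2]
      · omega
  · constructor
    · intro hp
      rcases List.mem_flatMap.mp hp with ⟨k, hk, hpk⟩
      rw [List.mem_range] at hk
      rcases List.mem_map.mp hpk with ⟨a, ha, rfl⟩
      rw [List.mem_range] at ha
      exact Or.inr ⟨h2, (a : Int), row + (k : Int), by positivity, by omega, by omega, by omega, rfl⟩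
    · rintro (⟨h3, _⟩ | ⟨_, a, b, h3, h4, h5, h6, rfl⟩)
      · omega
      · apply List.mem_flatMap.mpr
        refine ⟨(b - row).toNat, List.mem_range.mpr (by omega), ?_⟩
        apply List.mem_map.mpr
        refine ⟨a.toNat, List.mem_range.mpr (by omega), ?_⟩
        have e1 : row + (((b - row).toNat : Nat) : Int) = b := by omega
        have e2 : ((a.toNat : Nat) : Int) = a := by omega
        rw [e1, e2]
  · simp
    omega

lemma pvMem_full (row col : Int) (p : List Int) :
    p ∈ (List.range (min row col).toNat).flatMap pvShell ++ pvTail row col ↔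
      ∃ a b : Int, 0 ≤ a ∧ a < row ∧ 0 ≤ b ∧ b < col ∧ p = [a, b] := by
  rw [List.mem_append, pvMem_shells, pvMem_tail]
  constructor
  · rintro (⟨a, b, ha, hb, hmax, rfl⟩ | ⟨_, a, b, h3, h4, h5, h6, rfl⟩ | ⟨_, a, b, h3, h4, h5, h6, rfl⟩)
    · refine ⟨a, b, ha, ?_, hb, ?_, rfl⟩ <;>
        · rcases le_total row col with h | h
          · have : min row col = row := min_eq_left h
            omega
          · have : min row col = col := min_eq_right h
            omega
    · exact ⟨a, b, by omega, h4, h5, h6, rfl⟩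
    · exact ⟨a, b, h3, h4, by omega, h6, rfl⟩
  · rintro ⟨a, b, ha, har, hb, hbc, rfl⟩
    rcases lt_trichotomy row col with h | h | h
    · have hm : min row col = row := min_eq_left (le_of_lt h)
      by_cases hbr : b < row
      · exact Or.inl ⟨a, b, ha, hb, by omega, rfl⟩
      · exact Or.inr (Or.inr ⟨h, a, b, ha, har, by omega, hbc, rfl⟩)
    · have hm : min row col = row := min_eq_left (le_of_eq h)
      exact Or.inl ⟨a, b, ha, hb, by omega, rfl⟩
    · have hm : min row col = col := min_eq_right (le_of_lt h)
      by_cases hac : a < col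
      · exact Or.inl ⟨a, b, ha, hb, by omega, rfl⟩
      · exact Or.inr (Or.inl ⟨h, a, b, by omega, har, hb, hbc, rfl⟩)


lemma pvNodup_loopindex_shape (row col : Int) :
    ((List.range (min row col).toNat).flatMap pvShell ++ pvTail row col).Nodup := by
  have h := pvPairwise_full row col
  exact h.imp (fun {p q} hlt => by rintro rfl; exact absurd hlt (lt_irrefl _))

lemma pvMem_prod (row col : Int) (p : List Int) :
    p ∈ (PySem.List.pyRange 0 row).flatMap (fun a => (PySem.List.pyRange 0 col).map (fun b => [a, b])) ↔
      ∃ a b : Int, 0 ≤ a ∧ a < row ∧ 0 ≤ b ∧ b < col ∧ p = [a, b] := by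
  simp only [List.mem_flatMap, List.mem_map, PySem.List.mem_pyRange_one]
  constructor
  · rintro ⟨a, ⟨ha0, har⟩, b, ⟨hb0, hbc⟩, rfl⟩
    exact ⟨a, b, ha0, har, hb0, hbc, rfl⟩
  · rintro ⟨a, b, ha0, har, hb0, hbc, rfl⟩
    exact ⟨a, ⟨ha0, har⟩, b, ⟨hb0, hbc⟩, rfl⟩

lemma pvNodup_prod (row col : Int) :
    ((PySem.List.pyRange 0 row).flatMap (fun a => (PySem.List.pyRange 0 col).map (fun b => [a, b]))).Nodup := by
  rw [List.nodup_flatMap]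
  constructor
  · intro a _
    refine (PySem.List.nodup_pyRange_one 0 col).map ?_
    intro b b' h
    simpa using h
  · refine (PySem.List.nodup_pyRange_one 0 row).imp ?_
    intro a a' hne xs hx hx'
    rcases List.mem_map.mp hx with ⟨b, _, rfl⟩
    rcases List.mem_map.mp hx' with ⟨b', _, he⟩
    have h2 : a' = a ∧ b' = b := by simpa using he
    exact hne h2.1.symm

theorem loopindex_spec : Claim_equal_loopindex := by
  intro row col _
  unfold Spec_loopindex loopindex_alt
  dsimp only
  rw [pvLoopindex_eq]
  refine (PySem.List.sorted_eq_of_perm_of_pairwise_lt _ _ pvKeyB ?_ (pvPairwise_full row col)).symm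
  rw [List.perm_ext_iff_of_nodup (pvNodup_loopindex_shape row col) (pvNodup_prod row col)]
  intro p
  rw [pvMem_full, pvMem_prod]
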